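-- pv_equiv track=rewrite | github.com/JMaskiewicz/my-leetcode | solving_5.py | preprocess_throws
-- ===== SOURCE A (Python) =====
-- def preprocess_throws(players):
--     from collections import defaultdict
--
--     vertical, horizontal = defaultdict(list), defaultdict(list)
--     diagonal1, diagonal2 = defaultdict(list), defaultdict(list)
--
--     for idx, (x, y) in enumerate(players):
--         player_number = idx + 1  # 1-based index
--
--         # Store players by vertical and horizontal alignment
--         vertical[x].append((y, player_number))  # Sorted by y
--         horizontal[y].append((x, player_number))  # Sorted by x
--
--         b1 = y - x  # Line equation y = x - b
--         b2 = y + x  # Line equation y = x + b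
--
--         diagonal1[b1].append((x, player_number))
--         diagonal2[b2].append((x, player_number))
--
--     # Sort players in each group for fast nearest-neighbor lookup
--     for d in [vertical, horizontal, diagonal1, diagonal2]:
--         for key in d:
--             d[key].sort()  # Ensure sorted order for binary search
--
--     return vertical, horizontal, diagonal1, diagonal2
-- ===== SOURCE B (Python) =====
-- def preprocess_throws(players):
--     from collections import defaultdict
--
--     def insert_sorted(lst, item):
--         # keep lst sorted at all times: find the insertion point, splice the item in
--         i = 0
--         while i < len(lst) and lst[i] < item:
--             i += 1
--         lst.insert(i, item)
--
--     def build(pairs):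
--         d = defaultdict(list)
--         for key, value in pairs:
--             insert_sorted(d[key], value)
--         return d
--
--     numbered = [(x, y, n) for n, (x, y) in enumerate(players, 1)]
--     vertical = build((x, (y, n)) for x, y, n in numbered)
--     horizontal = build((y, (x, n)) for x, y, n in numbered)
--     diagonal1 = build((y - x, (x, n)) for x, y, n in numbered)
--     diagonal2 = build((y + x, (x, n)) for x, y, n in numbered)
--     return vertical, horizontal, diagonal1, diagonal2
-- ===== Notes on version B (the rewrite author's own statement) =====
-- stated objective: alternative
-- what changed: A appends everything into four dicts in one pass and then sorts every bucket afterwards; B never sorts: each alignment dict is built by its own pass that splices every entry into its bucket at the correct position, so the buckets are kept sorted as an invariant and the final sorting sweep disappears.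
import Mathlib
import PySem

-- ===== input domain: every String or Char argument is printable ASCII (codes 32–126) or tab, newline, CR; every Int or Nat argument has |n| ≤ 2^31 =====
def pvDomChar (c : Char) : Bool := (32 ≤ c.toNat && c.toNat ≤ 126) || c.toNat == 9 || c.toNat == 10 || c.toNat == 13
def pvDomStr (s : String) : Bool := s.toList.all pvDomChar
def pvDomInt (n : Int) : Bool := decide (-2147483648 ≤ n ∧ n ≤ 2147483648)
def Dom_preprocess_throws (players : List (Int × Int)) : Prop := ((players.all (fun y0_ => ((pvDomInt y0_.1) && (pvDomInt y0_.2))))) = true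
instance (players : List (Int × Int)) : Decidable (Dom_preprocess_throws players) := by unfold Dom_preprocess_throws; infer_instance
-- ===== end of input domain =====

-- B builds every alignment dict by splicing each entry into its bucket at its sorted position, so the buckets stay sorted as an invariant and A's final per-bucket sorting sweep disappears (objective: alternative, similar cost).

-- ===== PORT A =====
-- d[key].sort() on a list of int pairs: Python compares tuples lexicographically = sorted2 by (fst, snd)
def pvSortA (d : PySem.Dict Int (List (Int × Int))) : List (Int × List (Int × Int)) :=
  d.items.map (fun kv => (kv.1, PySem.List.sorted2 kv.2 (fun v => v.1) (fun v => v.2)))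

def preprocess_throws (players : List (Int × Int)) :
    (List (Int × List (Int × Int))) × (List (Int × List (Int × Int))) × (List (Int × List (Int × Int))) × (List (Int × List (Int × Int))) :=
  -- one pass over enumerate(players), appending into the four defaultdicts
  let st := (PySem.List.enumerate players).foldl
    (fun st p =>
      (st.1.modify p.2.1 [] (fun vs => vs ++ [(p.2.2, p.1 + 1)]),
       st.2.1.modify p.2.2 [] (fun vs => vs ++ [(p.2.1, p.1 + 1)]),
       st.2.2.1.modify (p.2.2 - p.2.1) [] (fun vs => vs ++ [(p.2.1, p.1 + 1)]),
       st.2.2.2.modify (p.2.2 + p.2.1) [] (fun vs => vs ++ [(p.2.1, p.1 + 1)])))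
    ((PySem.Dict.empty : PySem.Dict Int (List (Int × Int))), (PySem.Dict.empty : PySem.Dict Int (List (Int × Int))), (PySem.Dict.empty : PySem.Dict Int (List (Int × Int))), (PySem.Dict.empty : PySem.Dict Int (List (Int × Int))))
  -- then every bucket of every dict is sorted in place
  (pvSortA st.1, pvSortA st.2.1, pvSortA st.2.2.1, pvSortA st.2.2.2)

-- ===== PORT B =====
-- insert_sorted(lst, item): scan to the first element not < item (tuple '<' is lexicographic on int pairs), splice item there
def pvInsSorted (item : Int × Int) : List (Int × Int) → List (Int × Int)
  | [] => [item]
  | h :: t => if h.1 < item.1 ∨ (h.1 = item.1 ∧ h.2 < item.2) then h :: pvInsSorted item t else item :: h :: t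

-- build(pairs): one pass, d[key] defaults to [] and gets the value spliced in at its sorted position
def pvBuildB (pairs : List (Int × (Int × Int))) : List (Int × List (Int × Int)) :=
  (pairs.foldl (fun d kv => d.modify kv.1 [] (fun vs => pvInsSorted kv.2 vs)) (PySem.Dict.empty : PySem.Dict Int (List (Int × Int)))).items

def preprocess_throws_alt (players : List (Int × Int)) :
    (List (Int × List (Int × Int))) × (List (Int × List (Int × Int))) × (List (Int × List (Int × Int))) × (List (Int × List (Int × Int))) :=
  let numbered := (PySem.List.enumerate players 1).map (fun p => (p.2.1, p.2.2, p.1))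
  (pvBuildB (numbered.map (fun t => (t.1, (t.2.1, t.2.2)))),
   pvBuildB (numbered.map (fun t => (t.2.1, (t.1, t.2.2)))),
   pvBuildB (numbered.map (fun t => (t.2.1 - t.1, (t.1, t.2.2)))),
   pvBuildB (numbered.map (fun t => (t.2.1 + t.1, (t.1, t.2.2)))))

-- ===== PRECONDITION & SPEC =====
def Spec_preprocess_throws (players : List (Int × Int)) (out : (List (Int × List (Int × Int))) × (List (Int × List (Int × Int))) × (List (Int × List (Int × Int))) × (List (Int × List (Int × Int)))) : Prop := out = preprocess_throws_alt players
instance (players : List (Int × Int)) (out : (List (Int × List (Int × Int))) × (List (Int × List (Int × Int))) × (List (Int × List (Int × Int))) × (List (Int × List (Int × Int)))) : Decidable (Spec_preprocess_throws players out) := by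
  unfold Spec_preprocess_throws
  letI : DecidableEq (List (Int × List (Int × Int))) := inferInstance
  infer_instance

-- ===== CLAIM (what is proved, stated in full; the proofs are below) =====
def Claim_equal_preprocess_throws : Prop := ∀ (players : List (Int × Int)), Dom_preprocess_throws players → Spec_preprocess_throws players (preprocess_throws players)

-- ===== LEMMAS AND PROOFS =====

-- sorted2 by two Int keys is sorted by the lexicographic pair key
lemma pv_sorted2_eq_sorted_lex {α : Type} (xs : List α) (k1 k2 : α → Int) :
    PySem.List.sorted2 xs k1 k2 false
      = PySem.List.sorted xs (fun x => toLex (k1 x, k2 x)) false := by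
  have hf : (fun (a b : α) => decide (k1 a < k1 b) || (!decide (k1 b < k1 a) && decide (k2 a < k2 b)))
      = (fun (a b : α) => decide (toLex (k1 a, k2 a) < toLex (k1 b, k2 b))) := by
    funext a b
    by_cases h1 : k1 a < k1 b
    · simp [h1, Prod.Lex.toLex_lt_toLex]
    · by_cases h2 : k1 b < k1 a
      · have hne : ¬ k1 a = k1 b := by omega
        simp [h1, h2, hne, Prod.Lex.toLex_lt_toLex]
      · have he : k1 a = k1 b := by omega
        simp [he, Prod.Lex.toLex_lt_toLex]
  simp only [PySem.List.sorted2, PySem.List.sorted, if_neg (by decide : ¬ (false = true)), hf]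

-- the splice guard of pvInsSorted is the lexicographic order on the pair
lemma pv_ins_guard (h v : Int × Int) :
    (h.1 < v.1 ∨ (h.1 = v.1 ∧ h.2 < v.2)) ↔ toLex h < toLex v := by
  rw [show h = (h.1, h.2) from rfl, show v = (v.1, v.2) from rfl, Prod.Lex.toLex_lt_toLex]

lemma pv_ins_perm (v : Int × Int) (l : List (Int × Int)) :
    (pvInsSorted v l).Perm (v :: l) := by
  induction l with
  | nil => simp [pvInsSorted]
  | cons h t ih =>
    unfold pvInsSorted
    split_ifs with hg
    · exact (ih.cons h).trans (List.Perm.swap v h t)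
    · exact List.Perm.refl _

lemma pv_ins_pairwise (v : Int × Int) (l : List (Int × Int))
    (hpw : l.Pairwise (fun a b => toLex a < toLex b))
    (hne : ∀ x ∈ l, x.2 ≠ v.2) :
    (pvInsSorted v l).Pairwise (fun a b => toLex a < toLex b) := by
  induction l with
  | nil => simp [pvInsSorted]
  | cons h t ih =>
    unfold pvInsSorted
    rw [List.pairwise_cons] at hpw
    split_ifs with hg
    · refine List.pairwise_cons.mpr ⟨?_, ih hpw.2 (fun x hx => hne x (by simp [hx]))⟩
      intro b hb
      rcases List.mem_cons.mp (((pv_ins_perm v t).mem_iff).mp hb) with hb | hb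
      · rw [hb]; exact (pv_ins_guard h v).mp hg
      · exact hpw.1 b hb
    · have hvh : toLex v < toLex h := by
        have : toLex h ≠ toLex v := by
          intro hEq
          exact hne h (by simp) (congrArg (fun p => (ofLex p).2) hEq)
        rcases lt_or_gt_of_ne this with h1 | h1
        · exact absurd ((pv_ins_guard h v).mpr h1) hg
        · exact h1
      refine List.pairwise_cons.mpr ⟨?_, List.pairwise_cons.mpr hpw⟩
      intro b hb
      rcases List.mem_cons.mp hb with hb | hb
      · rw [hb]; exact hvh
      · exact lt_trans hvh (hpw.1 b hb)

-- the repeated-splice fold: a permutation of acc ++ vals, strictly sorted throughout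
lemma pv_foldl_ins_perm (vals : List (Int × Int)) (acc : List (Int × Int)) :
    (vals.foldl (fun a v => pvInsSorted v a) acc).Perm (acc ++ vals) := by
  induction vals generalizing acc with
  | nil => simp
  | cons v vs ih =>
    simp only [List.foldl_cons]
    refine (ih (pvInsSorted v acc)).trans ?_
    refine ((pv_ins_perm v acc).append_right vs).trans ?_
    simpa using (List.perm_middle (a := v) (l₁ := acc) (l₂ := vs)).symm

lemma pv_foldl_ins_pairwise (vals : List (Int × Int)) (acc : List (Int × Int))
    (hpw : acc.Pairwise (fun a b => toLex a < toLex b))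
    (hnd : ((acc ++ vals).map (fun p => p.2)).Nodup) :
    (vals.foldl (fun a v => pvInsSorted v a) acc).Pairwise (fun a b => toLex a < toLex b) := by
  induction vals generalizing acc with
  | nil => simpa using hpw
  | cons v vs ih =>
    simp only [List.foldl_cons]
    have hndp : (acc.map (fun p => p.2) ++ v.2 :: vs.map (fun p => p.2)).Nodup := by
      simpa using hnd
    have hne : ∀ x ∈ acc, x.2 ≠ v.2 := by
      intro x hx hEq
      have h1 : x.2 ∈ acc.map (fun p => p.2) := List.mem_map_of_mem hx
      exact (List.nodup_append.mp hndp).2.2 x.2 h1 v.2 (by simp) hEq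
    refine ih (pvInsSorted v acc) (pv_ins_pairwise v acc hpw hne) ?_
    have hperm : ((pvInsSorted v acc ++ vs).map (fun p => p.2)).Perm ((acc ++ v :: vs).map (fun p => p.2)) := by
      refine List.Perm.map _ ?_
      refine ((pv_ins_perm v acc).append_right vs).trans ?_
      simpa using (List.perm_middle (a := v) (l₁ := acc) (l₂ := vs)).symm
    exact hperm.nodup_iff.mpr hnd

-- B's bucket at k is the repeated splice of exactly the values filed under k
lemma pv_ins_getD (pairs : List (Int × (Int × Int))) (d : PySem.Dict Int (List (Int × Int))) (k : Int) :
    (pairs.foldl (fun d kv => d.modify kv.1 [] (fun vs => pvInsSorted kv.2 vs)) d).getD k []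
      = ((pairs.filter (fun p => p.1 == k)).map (fun p => p.2)).foldl (fun a v => pvInsSorted v a) (d.getD k []) := by
  induction pairs generalizing d with
  | nil => rfl
  | cons p ps ih =>
    simp only [List.foldl_cons]
    rw [ih]
    by_cases hk : p.1 = k
    · subst hk
      simp [PySem.Dict.getD_modify_self]
    · rw [List.filter_cons_of_neg (by simpa using hk)]
      rw [PySem.Dict.getD_modify]
      simp [Ne.symm hk]

-- the per-alignment equation: A's append-then-sort dict equals B's splice-as-you-go dict
lemma pv_group (pairs : List (Int × (Int × Int)))
    (hnd : (pairs.map (fun p => p.2.2)).Nodup) :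
    pvSortA (pairs.foldl (fun d kv => d.modify kv.1 [] (fun vs => vs ++ [kv.2])) PySem.Dict.empty)
      = pvBuildB pairs := by
  unfold pvSortA pvBuildB
  set dA := pairs.foldl (fun d kv => d.modify kv.1 [] (fun vs => vs ++ [kv.2])) (PySem.Dict.empty : PySem.Dict Int (List (Int × Int))) with hdA
  set dB := pairs.foldl (fun d kv => d.modify kv.1 [] (fun vs => pvInsSorted kv.2 vs)) (PySem.Dict.empty : PySem.Dict Int (List (Int × Int))) with hdB
  have hkA : dA.keys = PySem.Set.update (PySem.Dict.empty : PySem.Dict Int (List (Int × Int))).keys (pairs.map (fun p => p.1)) := by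
    rw [hdA]
    exact PySem.Dict.keys_foldl_modify_key pairs (fun p => p.1) [] (fun _ kv vs => vs ++ [kv.2]) PySem.Dict.empty
  have hkB : dB.keys = PySem.Set.update (PySem.Dict.empty : PySem.Dict Int (List (Int × Int))).keys (pairs.map (fun p => p.1)) := by
    rw [hdB]
    exact PySem.Dict.keys_foldl_modify_key pairs (fun p => p.1) [] (fun _ kv vs => pvInsSorted kv.2 vs) PySem.Dict.empty
  have hndA : dA.keys.Nodup := by
    rw [hdA]
    exact PySem.Dict.nodup_keys_foldl_modify_key pairs (fun p => p.1) [] (fun _ kv vs => vs ++ [kv.2]) _ PySem.Dict.nodup_keys_empty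
  have hndB : dB.keys.Nodup := by
    rw [hdB]
    exact PySem.Dict.nodup_keys_foldl_modify_key pairs (fun p => p.1) [] (fun _ kv vs => pvInsSorted kv.2 vs) _ PySem.Dict.nodup_keys_empty
  rw [PySem.Dict.items_eq_map_keys dA hndA [], PySem.Dict.items_eq_map_keys dB hndB [], hkA, hkB, List.map_map]
  apply List.map_congr_left
  intro k _
  simp only [Function.comp]
  congr 1
  have hgA : dA.getD k [] = (pairs.filter (fun p => p.1 == k)).map (fun p => p.2) := by
    rw [hdA, PySem.Dict.getD_foldl_modify_append]
    simp
  have hgB : dB.getD k []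
      = ((pairs.filter (fun p => p.1 == k)).map (fun p => p.2)).foldl (fun a v => pvInsSorted v a) [] := by
    rw [hdB, pv_ins_getD]
    simp
  set vals := (pairs.filter (fun p => p.1 == k)).map (fun p => p.2) with hvals
  rw [hgA, hgB, pv_sorted2_eq_sorted_lex]
  have hndv : (vals.map (fun p => p.2)).Nodup := by
    rw [hvals, List.map_map]
    have : ((pairs.filter (fun p => p.1 == k)).map ((fun p : Int × Int => p.2) ∘ (fun p : Int × (Int × Int) => p.2)))
        = (pairs.filter (fun p => p.1 == k)).map (fun p => p.2.2) := rfl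
    rw [this]
    exact hnd.sublist (List.filter_sublist.map _)
  refine PySem.List.sorted_eq_of_perm_of_pairwise_lt vals _ (fun x => toLex (x.1, x.2)) ?_ ?_
  · simpa using pv_foldl_ins_perm vals []
  · have := pv_foldl_ins_pairwise vals [] (by simp) (by simpa using hndv)
    refine this.imp ?_
    intro a b h
    simpa using h
-- the 1-based player numbers are distinct
lemma pv_numbers_nodup (players : List (Int × Int)) :
    ((PySem.List.enumerate players).map (fun p => p.1 + 1)).Nodup := by
  have h := PySem.List.pairwise_lt_enumerate players 0
  rw [List.Nodup, List.pairwise_map]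
  exact h.imp (fun hlt => by omega)

-- enumerate with start 1 shifts enumerate from 0
lemma pv_enum_shift {α : Type} (xs : List α) (s : Int) :
    PySem.List.enumerate xs (s + 1) = (PySem.List.enumerate xs s).map (fun p => (p.1 + 1, p.2)) := by
  induction xs generalizing s with
  | nil => simp [PySem.List.enumerate_nil]
  | cons x xs ih =>
    rw [PySem.List.enumerate_cons, PySem.List.enumerate_cons, List.map_cons, ← ih (s + 1)]

-- splitting A's single pass with four dict accumulators into four independent passes
lemma pv_foldl_prod4 (l : List (Int × (Int × Int)))
    (u1 u2 u3 u4 : PySem.Dict Int (List (Int × Int)) → (Int × (Int × Int)) → PySem.Dict Int (List (Int × Int)))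
    (d1 d2 d3 d4 : PySem.Dict Int (List (Int × Int))) :
    l.foldl (fun st p => (u1 st.1 p, u2 st.2.1 p, u3 st.2.2.1 p, u4 st.2.2.2 p)) (d1, d2, d3, d4)
      = (l.foldl u1 d1, l.foldl u2 d2, l.foldl u3 d3, l.foldl u4 d4) := by
  rw [PySem.List.foldl_prod_mk (f := u1) (g := fun s p => (u2 s.1 p, u3 s.2.1 p, u4 s.2.2 p))]
  rw [PySem.List.foldl_prod_mk (f := u2) (g := fun s p => (u3 s.1 p, u4 s.2 p))]
  rw [PySem.List.foldl_prod_mk (f := u3) (g := u4)]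

-- ===== VERDICT (by name: the statement is the Claim_ definition above) =====
theorem preprocess_throws_spec : Claim_equal_preprocess_throws := by
  intro players _
  show preprocess_throws players = preprocess_throws_alt players
  unfold preprocess_throws preprocess_throws_alt
  simp only []
  have hnum : (PySem.List.enumerate players 1).map (fun p : Int × (Int × Int) => (p.2.1, p.2.2, p.1))
      = (PySem.List.enumerate players).map (fun p : Int × (Int × Int) => (p.2.1, p.2.2, p.1 + 1)) := by
    rw [show (1 : Int) = 0 + 1 from rfl, pv_enum_shift, List.map_map]
    rfl
  have hsplit := pv_foldl_prod4 (PySem.List.enumerate players)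
    (fun d p => d.modify p.2.1 [] (fun vs => vs ++ [(p.2.2, p.1 + 1)]))
    (fun d p => d.modify p.2.2 [] (fun vs => vs ++ [(p.2.1, p.1 + 1)]))
    (fun d p => d.modify (p.2.2 - p.2.1) [] (fun vs => vs ++ [(p.2.1, p.1 + 1)]))
    (fun d p => d.modify (p.2.2 + p.2.1) [] (fun vs => vs ++ [(p.2.1, p.1 + 1)]))
    PySem.Dict.empty PySem.Dict.empty PySem.Dict.empty PySem.Dict.empty
  rw [hsplit]
  have hnd0 : (((PySem.List.enumerate players).map (fun p : Int × (Int × Int) => (p.2.1, p.2.2, p.1 + 1))).map (fun t : Int × Int × Int => t.2.2)).Nodup := by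
    rw [List.map_map]
    exact pv_numbers_nodup players
  rw [hnum]
  rw [List.map_map, List.map_map, List.map_map, List.map_map]
  have e1 : ((PySem.List.enumerate players).map ((fun t : Int × Int × Int => (t.1, (t.2.1, t.2.2))) ∘ (fun p : Int × (Int × Int) => (p.2.1, p.2.2, p.1 + 1))))
      = (PySem.List.enumerate players).map (fun p : Int × (Int × Int) => (p.2.1, (p.2.2, p.1 + 1))) := rfl
  have e2 : ((PySem.List.enumerate players).map ((fun t : Int × Int × Int => (t.2.1, (t.1, t.2.2))) ∘ (fun p : Int × (Int × Int) => (p.2.1, p.2.2, p.1 + 1))))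
      = (PySem.List.enumerate players).map (fun p : Int × (Int × Int) => (p.2.2, (p.2.1, p.1 + 1))) := rfl
  have e3 : ((PySem.List.enumerate players).map ((fun t : Int × Int × Int => (t.2.1 - t.1, (t.1, t.2.2))) ∘ (fun p : Int × (Int × Int) => (p.2.1, p.2.2, p.1 + 1))))
      = (PySem.List.enumerate players).map (fun p : Int × (Int × Int) => (p.2.2 - p.2.1, (p.2.1, p.1 + 1))) := rfl
  have e4 : ((PySem.List.enumerate players).map ((fun t : Int × Int × Int => (t.2.1 + t.1, (t.1, t.2.2))) ∘ (fun p : Int × (Int × Int) => (p.2.1, p.2.2, p.1 + 1))))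
      = (PySem.List.enumerate players).map (fun p : Int × (Int × Int) => (p.2.2 + p.2.1, (p.2.1, p.1 + 1))) := rfl
  rw [e1, e2, e3, e4]
  have g1 := pv_group ((PySem.List.enumerate players).map (fun p : Int × (Int × Int) => (p.2.1, (p.2.2, p.1 + 1)))) (by rw [List.map_map]; exact pv_numbers_nodup players)
  have g2 := pv_group ((PySem.List.enumerate players).map (fun p : Int × (Int × Int) => (p.2.2, (p.2.1, p.1 + 1)))) (by rw [List.map_map]; exact pv_numbers_nodup players)
  have g3 := pv_group ((PySem.List.enumerate players).map (fun p : Int × (Int × Int) => (p.2.2 - p.2.1, (p.2.1, p.1 + 1)))) (by rw [List.map_map]; exact pv_numbers_nodup players)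
  have g4 := pv_group ((PySem.List.enumerate players).map (fun p : Int × (Int × Int) => (p.2.2 + p.2.1, (p.2.1, p.1 + 1)))) (by rw [List.map_map]; exact pv_numbers_nodup players)
  rw [List.foldl_map] at g1 g2 g3 g4
  exact congrArg₂ Prod.mk g1 (congrArg₂ Prod.mk g2 (congrArg₂ Prod.mk g3 g4))
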